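-- pv_equiv track=rewrite | github.com/baktrak09/racesync | v1.py | generate_seo_recommendations
-- ===== SOURCE A (Python) =====
-- def generate_seo_recommendations(product_scores):
--     """Generates SEO improvement recommendations based on product scores."""
--     issues_count = {}
--
--     # Count how often each issue appears
--     for product in product_scores:
--         for issue in product["issues"]:
--             issues_count[issue] = issues_count.get(issue, 0) + 1
--
--     # Sort issues by frequency
--     sorted_issues = sorted(issues_count.items(), key=lambda x: x[1], reverse=True)
--
--     # Create recommendations
--     recommendations = []
--     for issue, count in sorted_issues:
--         recommendations.append(f"{issue} (Found in {count} products)")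
--
--     return recommendations
-- ===== SOURCE B (Python) =====
-- def generate_seo_recommendations(product_scores):
--     """Generates SEO improvement recommendations based on product scores."""
--     issues_count = {}
--
--     # Count how often each issue appears
--     for product in product_scores:
--         for issue in product["issues"]:
--             issues_count[issue] = issues_count.get(issue, 0) + 1
--
--     # Bucket issues by their frequency (insertion order preserved inside a bucket)
--     buckets = {}
--     for issue, count in issues_count.items():
--         buckets.setdefault(count, []).append(issue)
--
--     # Emit buckets from the highest count down to 1 (counting sort, no comparison sort)
--     recommendations = []
--     for count in range(max(buckets, default=0), 0, -1):
--         for issue in buckets.get(count, []):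
--             recommendations.append(f"{issue} (Found in {count} products)")
--
--     return recommendations
-- ===== Notes on version B (the rewrite author's own statement) =====
-- stated objective: alternative
-- what changed: Replaces the comparison sort (sorted by frequency, reverse=True) with a counting/bucket sort: issues are grouped into buckets keyed by their count and emitted from the maximal count down to 1, preserving first-appearance order inside each bucket.
import Mathlib
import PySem

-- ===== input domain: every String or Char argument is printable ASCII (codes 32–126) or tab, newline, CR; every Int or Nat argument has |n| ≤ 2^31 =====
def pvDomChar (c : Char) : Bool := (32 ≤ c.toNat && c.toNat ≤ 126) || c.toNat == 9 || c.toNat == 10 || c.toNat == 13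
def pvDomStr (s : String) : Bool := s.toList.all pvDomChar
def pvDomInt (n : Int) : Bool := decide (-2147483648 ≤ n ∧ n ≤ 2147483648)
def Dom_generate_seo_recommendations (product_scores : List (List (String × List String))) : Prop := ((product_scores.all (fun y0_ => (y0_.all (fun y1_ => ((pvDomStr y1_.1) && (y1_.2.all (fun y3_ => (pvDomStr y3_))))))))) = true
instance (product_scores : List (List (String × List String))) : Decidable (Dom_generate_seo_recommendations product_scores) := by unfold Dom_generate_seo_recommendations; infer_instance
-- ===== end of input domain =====

-- B replaces the comparison sort by a counting/bucket sort over the frequencies (objective: alternative).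

-- shared helpers: both Pythons format with the same f-string and read product["issues"] the same way
def fmtIssue (issue : String) (count : Int) : String :=
  issue ++ " (Found in " ++ PySem.Int.toStr count ++ " products)"

-- product["issues"]; the KeyError case (get? = none) is excluded by Pre_
def pvIssuesOf (product : List (String × List String)) : List String :=
  ((PySem.Dict.ofList product).get? "issues").getD []

-- ===== PORT A =====
def generate_seo_recommendations (product_scores : List (List (String × List String))) : List String :=
  let issues_count : PySem.Dict String Int :=
    product_scores.foldl
      (fun d product =>
        (pvIssuesOf product).foldl (fun d issue => d.insert issue (d.getD issue 0 + 1)) d)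
      PySem.Dict.empty
  let sorted_issues := PySem.List.sorted issues_count.items (fun x => x.2) true
  sorted_issues.foldl (fun recommendations p => recommendations ++ [fmtIssue p.1 p.2]) []

-- ===== PORT B =====
def generate_seo_recommendations_alt (product_scores : List (List (String × List String))) : List String :=
  let issues_count : PySem.Dict String Int :=
    product_scores.foldl
      (fun d product =>
        (pvIssuesOf product).foldl (fun d issue => d.insert issue (d.getD issue 0 + 1)) d)
      PySem.Dict.empty
  -- buckets.setdefault(count, []).append(issue)  ≡  modify count [] (· ++ [issue])
  let buckets : PySem.Dict Int (List String) :=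
    issues_count.items.foldl (fun b p => b.modify p.2 [] (fun xs => xs ++ [p.1])) PySem.Dict.empty
  let max_count : Int := PySem.List.maxD buckets.keys (fun c => c) 0   -- max(buckets, default=0)
  (PySem.List.pyRange max_count 0 (-1)).foldl
    (fun recommendations c =>
      (buckets.getD c []).foldl (fun recommendations issue => recommendations ++ [fmtIssue issue c]) recommendations)
    []

-- ===== PRECONDITION & SPEC =====
-- A raises KeyError on any product without an "issues" key; exactly those inputs are excluded.
def Pre_generate_seo_recommendations (product_scores : List (List (String × List String))) : Prop :=
  ∀ product ∈ product_scores, (PySem.Dict.ofList product).contains "issues" = true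
instance (product_scores : List (List (String × List String))) : Decidable (Pre_generate_seo_recommendations product_scores) := by unfold Pre_generate_seo_recommendations; infer_instance

def pvWitness_generate_seo_recommendations : (List (List (String × List String))) :=
  [[("issues", ["thin content", "no meta"])], [("issues", ["no meta"])]]

def Spec_generate_seo_recommendations (product_scores : List (List (String × List String))) (out : List String) : Prop := out = generate_seo_recommendations_alt product_scores
instance (product_scores : List (List (String × List String))) (out : List String) : Decidable (Spec_generate_seo_recommendations product_scores out) := by unfold Spec_generate_seo_recommendations; infer_instance

-- ===== CLAIM (what is proved, stated in full; the proofs are below) =====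
def Claim_equal_generate_seo_recommendations : Prop := ∀ (product_scores : List (List (String × List String))), Dom_generate_seo_recommendations product_scores → Pre_generate_seo_recommendations product_scores → Spec_generate_seo_recommendations product_scores (generate_seo_recommendations product_scores)

-- ===== LEMMAS AND PROOFS =====

-- small equations for PySem.List.insertBy
theorem insertBy_cons {α : Type} (before : α → α → Bool) (x y : α) (ys : List α) :
    PySem.List.insertBy before x (y :: ys) =
      if before x y then x :: y :: ys else y :: PySem.List.insertBy before x ys := rfl

theorem insertBy_all_before {α : Type} (before : α → α → Bool) (x : α) (as : List α)
    (h : ∀ a ∈ as, before x a = true) :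
    PySem.List.insertBy before x as = x :: as := by
  cases as with
  | nil => rfl
  | cons a t => rw [insertBy_cons, if_pos (h a (by simp))]

theorem insertBy_append_not {α : Type} (before : α → α → Bool) (x : α) (as bs : List α)
    (h : ∀ a ∈ as, before x a = false) :
    PySem.List.insertBy before x (as ++ bs) = as ++ PySem.List.insertBy before x bs := by
  induction as with
  | nil => simp
  | cons a t ih =>
    have ha : before x a = false := h a (by simp)
    simp only [List.cons_append, insertBy_cons, ha, Bool.false_eq_true, if_false]
    rw [ih (fun a ha => h a (by simp [ha]))]

-- inserting one element into a bucket decomposition keeps it a bucket decomposition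
theorem bucket_insert {α : Type} (key : α → Int) (cs : List Int) (x : α) (l : List α)
    (hcs : cs.Pairwise (· > ·)) (hx : key x ∈ cs) :
    PySem.List.insertBy (fun a b => decide (key b < key a)) x
        (cs.flatMap (fun c => l.filter (fun y => key y == c)))
      = cs.flatMap (fun c => (l ++ [x]).filter (fun y => key y == c)) := by
  induction cs with
  | nil => cases hx
  | cons c cs ih =>
    rw [List.pairwise_cons] at hcs
    obtain ⟨hgt, htail⟩ := hcs
    simp only [List.flatMap_cons]
    by_cases hkx : key x = c
    · have hnot : ∀ a ∈ l.filter (fun y => key y == c), decide (key a < key x) = false := by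
        intro a ha
        have := (List.mem_filter.mp ha).2
        simp only [beq_iff_eq] at this
        simp [this, hkx]
      have hall : ∀ a ∈ cs.flatMap (fun c' => l.filter (fun y => key y == c')),
          decide (key a < key x) = true := by
        intro a ha
        obtain ⟨c', hc', ha'⟩ := List.mem_flatMap.mp ha
        have := (List.mem_filter.mp ha').2
        simp only [beq_iff_eq] at this
        have := hgt c' hc'
        simp; omega
      rw [insertBy_append_not _ _ _ _ hnot, insertBy_all_before _ _ _ hall]
      have h1 : (l ++ [x]).filter (fun y => key y == c) = l.filter (fun y => key y == c) ++ [x] := by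
        simp [List.filter_append, hkx]
      have h2 : cs.flatMap (fun c' => (l ++ [x]).filter (fun y => key y == c'))
          = cs.flatMap (fun c' => l.filter (fun y => key y == c')) := by
        apply List.flatMap_congr
        intro c' hc'
        have := hgt c' hc'
        simp [List.filter_append]
        omega
      rw [h1, h2]
      simp
    · have hx' : key x ∈ cs := by
        cases hx with
        | head => exact absurd rfl hkx
        | tail _ h => exact h
      have hnot : ∀ a ∈ l.filter (fun y => key y == c), decide (key a < key x) = false := by
        intro a ha
        have hac := (List.mem_filter.mp ha).2
        simp only [beq_iff_eq] at hac
        have := hgt (key x) hx'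
        simp; omega
      rw [insertBy_append_not _ _ _ _ hnot, ih htail hx']
      have h1 : (l ++ [x]).filter (fun y => key y == c) = l.filter (fun y => key y == c) := by
        simp [List.filter_append, hkx]
      rw [h1]

-- stable reverse sort by an Int key = buckets listed along any strictly descending
-- list of keys covering all keys, in original order inside each bucket
theorem sorted_rev_eq_buckets {α : Type} (key : α → Int) (cs : List Int) (l : List α)
    (hcs : cs.Pairwise (· > ·)) :
    (∀ y ∈ l, key y ∈ cs) →
    PySem.List.sorted l key true = cs.flatMap (fun c => l.filter (fun y => key y == c)) := by
  rw [PySem.List.sorted_rev_eq_foldl_insertBy]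
  induction l using List.reverseRecOn with
  | nil => intro _; simp
  | append_singleton l x ih =>
    intro hl
    rw [List.foldl_append, List.foldl_cons, List.foldl_nil,
        ih (fun y hy => hl y (by simp [hy])),
        bucket_insert key cs x l hcs (hl x (by simp))]

theorem le_maxD_int (xs : List Int) (c : Int) (hc : c ∈ xs) :
    c ≤ PySem.List.maxD xs (fun c => c) 0 := by
  unfold PySem.List.maxD
  cases hm : PySem.List.max? xs (fun c => c) with
  | none =>
    exfalso
    have := (PySem.List.max?_eq_none_iff xs (fun c => c)).mp hm
    subst this; cases hc
  | some m => exact PySem.List.max?_isMax hm c hc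

-- ===== VERDICT (by name: the statement is the Claim_ definition above) =====
-- the counting loop of both ports is Counter(all issues, flattened)
theorem count_fold_eq_counter (ps : List (List (String × List String))) :
    ps.foldl
      (fun d product =>
        (pvIssuesOf product).foldl (fun d issue => d.insert issue (d.getD issue 0 + 1)) d)
      PySem.Dict.empty = PySem.Dict.counter (ps.flatMap pvIssuesOf) := by
  rw [← PySem.Dict.foldl_insert_getD_add_one_eq_counter, List.foldl_flatMap]

-- ===== VERDICT (by name: the statement is the Claim_ definition above) =====
theorem generate_seo_recommendations_spec : Claim_equal_generate_seo_recommendations := by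
  intro ps _ _
  unfold Spec_generate_seo_recommendations generate_seo_recommendations generate_seo_recommendations_alt
  simp only [count_fold_eq_counter]
  set A := ps.flatMap pvIssuesOf with hA
  set items := (PySem.Dict.counter A).items with hitems
  set buckets := items.foldl (fun b p => b.modify p.2 [] (fun xs => xs ++ [p.1])) PySem.Dict.empty with hbuckets
  set M := PySem.List.maxD buckets.keys (fun c => c) 0 with hM
  have hkeys : buckets.keys = PySem.Set.ofList (items.map (fun p => p.2)) := by
    rw [hbuckets, PySem.Dict.keys_foldl_modify_key items (fun p => p.2) []
        (fun _ p => (fun xs => xs ++ [p.1]))]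
    simp [PySem.Set.update_nil_left]
  have hgetD : ∀ c : Int, buckets.getD c []
      = (items.filter (fun p => p.2 == c)).map (fun p => p.1) := by
    intro c
    have hswap : buckets = (items.map (fun p => (p.2, p.1))).foldl
        (fun b q => b.modify q.1 [] (fun xs => xs ++ [q.2])) PySem.Dict.empty := by
      rw [hbuckets, List.foldl_map]
    rw [hswap, PySem.Dict.getD_foldl_modify_append]
    simp [List.filter_map, List.map_map, Function.comp_def]
  have hbound : ∀ p ∈ items, 0 < p.2 ∧ p.2 ≤ M := by
    intro p hp
    constructor
    · rw [hitems, PySem.Dict.items_counter] at hp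
      obtain ⟨k, hk, rfl⟩ := List.mem_map.mp hp
      have hkA : k ∈ A := (PySem.Set.mem_ofList A k).mp hk
      have : 0 < A.count k := List.count_pos_iff.mpr hkA
      simpa using this
    · rw [hM]
      apply le_maxD_int
      rw [hkeys]
      exact (PySem.Set.mem_ofList _ _).mpr (List.mem_map.mpr ⟨p, hp, rfl⟩)
  have hpair : (PySem.List.pyRange M 0 (-1)).Pairwise (· > ·) := by
    rw [PySem.List.pyRange_neg_one_eq_reverse]
    exact List.pairwise_reverse.mpr (PySem.List.pairwise_lt_pyRange_one _ _)
  have hmem : ∀ p ∈ items, (p.2 : Int) ∈ PySem.List.pyRange M 0 (-1) := by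
    intro p hp
    exact PySem.List.mem_pyRange_neg_one.mpr ⟨(hbound p hp).1, (hbound p hp).2⟩
  rw [PySem.List.foldl_append_singleton_eq_map, List.nil_append,
      sorted_rev_eq_buckets (fun p => p.2) (PySem.List.pyRange M 0 (-1)) items hpair hmem]
  simp only [hgetD, PySem.List.foldl_append_singleton_eq_map]
  rw [PySem.List.foldl_append_eq_flatMap, List.nil_append, List.map_flatMap]
  apply List.flatMap_congr
  intro c _
  rw [List.map_map]
  apply List.map_congr_left
  intro p hp
  have := (List.mem_filter.mp hp).2
  simp only [beq_iff_eq] at this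
  simp [this]
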